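-- pv_equiv track=rewrite | github.com/pypi-data/pypi-mirror-337 | packages/tucan/tucan-0.5.0.tar.gz/tucan-0.5.0/src/tucan/unformat_py.py | remove_combined_chars
-- ===== SOURCE A (Python) =====
-- from typing import List
--
-- COMB_CHARS = {"'''": "\xaa", '"""': "\xbb"}
--
-- def remove_combined_chars(code: List[str]) -> List[str]:
--     """replace combined chars with single char alternatives"""
--     new_code = []
--     for line in code:
--         rline = line
--         for cchar, rchar in COMB_CHARS.items():
--             rline = rline.replace(cchar, rchar)
--         new_code.append(rline)
--     return new_code
-- ===== SOURCE B (Python) =====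
-- from typing import List
--
-- COMB_CHARS = {"'''": "\xaa", '"""': "\xbb"}
--
--
-- def _rewrite(line: str) -> str:
--     """single left-to-right scan: dispatch on the 3-char window at each position"""
--     buf = []
--     i = 0
--     n = len(line)
--     while i < n:
--         window = line[i:i + 3]
--         if window == "'''":
--             buf.append("\xaa")
--             i += 3
--         elif window == '"""':
--             buf.append("\xbb")
--             i += 3
--         else:
--             buf.append(line[i])
--             i += 1
--     return "".join(buf)
--
--
-- def remove_combined_chars(code: List[str]) -> List[str]:
--     """replace combined chars with single char alternatives"""
--     return [_rewrite(line) for line in code]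
-- ===== Notes on version B (the rewrite author's own statement) =====
-- stated objective: alternative
-- what changed: Per line, the two sequential str.replace passes over the whole string are replaced by a single left-to-right character scan that dispatches on the 3-char window at each position, emitting the substitute char or the original char; safe because the two tokens share no characters.
import Mathlib
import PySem

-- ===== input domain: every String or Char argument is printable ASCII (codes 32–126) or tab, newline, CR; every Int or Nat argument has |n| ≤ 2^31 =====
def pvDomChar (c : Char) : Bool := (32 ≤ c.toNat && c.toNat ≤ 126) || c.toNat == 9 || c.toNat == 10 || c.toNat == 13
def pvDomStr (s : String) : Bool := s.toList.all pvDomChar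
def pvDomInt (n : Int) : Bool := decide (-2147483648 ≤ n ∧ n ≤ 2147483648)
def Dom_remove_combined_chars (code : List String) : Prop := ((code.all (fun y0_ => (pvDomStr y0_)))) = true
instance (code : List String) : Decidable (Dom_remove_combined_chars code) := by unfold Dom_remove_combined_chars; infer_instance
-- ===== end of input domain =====

-- B replaces A's two sequential str.replace passes per line by a single left-to-right
-- character scan dispatching on the 3-char window (objective: alternative, one pass instead of two).

-- ===== PORT A =====
def COMB_CHARS : PySem.Dict String String :=
  (PySem.Dict.empty.insert "'''" "\u00AA").insert "\"\"\"" "\u00BB"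

def remove_combined_chars (code : List String) : List String :=
  code.foldl (fun new_code line =>
    new_code ++ [COMB_CHARS.items.foldl (fun rline p => PySem.Str.replace rline p.1 p.2) line]) []

-- ===== PORT B =====
-- single scan: at each position compare the 3-char window (line[i:i+3]) with the two tokens
def scanLine : List Char → List Char
  | [] => []
  | c :: t =>
    if (c :: t).take 3 = ['\'', '\'', '\''] then '\u00AA' :: scanLine (t.drop 2)
    else if (c :: t).take 3 = ['"', '"', '"'] then '\u00BB' :: scanLine (t.drop 2)
    else c :: scanLine t
termination_by l => l.length
decreasing_by
  · simp only [List.length_cons, List.length_drop]; omega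
  · simp only [List.length_cons, List.length_drop]; omega
  · simp only [List.length_cons]; omega

def remove_combined_chars_alt (code : List String) : List String :=
  code.map (fun line => String.ofList (scanLine line.toList))

-- ===== PRECONDITION & SPEC =====
def Spec_remove_combined_chars (code : List String) (out : List String) : Prop := out = remove_combined_chars_alt code
instance (code : List String) (out : List String) : Decidable (Spec_remove_combined_chars code out) := by unfold Spec_remove_combined_chars; infer_instance

-- ===== CLAIM (what is proved, stated in full; the proofs are below) =====
def Claim_equal_remove_combined_chars : Prop := ∀ (code : List String), Dom_remove_combined_chars code → Spec_remove_combined_chars code (remove_combined_chars code)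

-- ===== LEMMAS AND PROOFS =====

-- fuel-free version of PySem.Chars.replace for a nonempty pattern
def repTok (old new : List Char) : List Char → List Char
  | [] => []
  | c :: t =>
    if old.isPrefixOf (c :: t) then new ++ repTok old new (t.drop (old.length - 1))
    else c :: repTok old new t
termination_by l => l.length
decreasing_by
  · simp only [List.length_cons, List.length_drop]; omega
  · simp only [List.length_cons]; omega

lemma repTok_nil (old new : List Char) : repTok old new [] = [] := by rw [repTok]

lemma repTok_cons_pos (old new : List Char) (c : Char) (t : List Char)
    (h : old.isPrefixOf (c :: t) = true) :
    repTok old new (c :: t) = new ++ repTok old new (t.drop (old.length - 1)) := by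
  rw [repTok, if_pos h]

lemma repTok_cons_neg (old new : List Char) (c : Char) (t : List Char)
    (h : old.isPrefixOf (c :: t) = false) :
    repTok old new (c :: t) = c :: repTok old new t := by
  rw [repTok, if_neg (by simp [h])]

lemma go_eq (old new : List Char) (hne : old ≠ []) :
    ∀ fuel l acc, l.length ≤ fuel →
      PySem.Chars.replace.go old new fuel l acc = acc.reverse ++ repTok old new l := by
  have hlen : 1 ≤ old.length := by
    cases old with | nil => exact absurd rfl hne | cons _ _ => simp
  intro fuel
  induction fuel with
  | zero =>
    intro l acc hl
    have : l = [] := List.eq_nil_of_length_eq_zero (Nat.le_zero.mp hl)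
    subst this
    simp [PySem.Chars.replace.go, repTok_nil]
  | succ n ih =>
    intro l acc hl
    cases l with
    | nil => simp [PySem.Chars.replace.go, repTok_nil]
    | cons c t =>
      have hl' : t.length ≤ n := by simp at hl; omega
      rw [PySem.Chars.replace.go]
      by_cases hp : old.isPrefixOf (c :: t)
      · simp only [hp, if_true]
        have hdrop : List.drop old.length (c :: t) = t.drop (old.length - 1) := by
          cases old with
          | nil => exact absurd rfl hne
          | cons o os => simp
        have hd2 : (t.drop (old.length - 1)).length ≤ n := by
          simp only [List.length_drop]; omega
        rw [hdrop, ih _ _ hd2, repTok_cons_pos old new c t hp]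
        simp
      · simp only [hp]
        rw [ih _ _ hl', repTok_cons_neg old new c t (by simp only [Bool.not_eq_true] at hp; exact hp)]
        simp

lemma replace_eq_repTok (s old new : List Char) (hne : old ≠ []) :
    PySem.Chars.replace s old new = repTok old new s := by
  rw [PySem.Chars.replace]
  have : old.isEmpty = false := by cases old with | nil => exact absurd rfl hne | cons _ _ => rfl
  rw [this]
  simpa using go_eq old new hne s.length s [] le_rfl

-- after the quote-triple pass, the first two characters can only be '"','"' if they already were
lemma take2_rep (t : List Char) (h : (repTok ['\'', '\'', '\''] ['\u00AA'] t).take 2 = ['"', '"']) :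
    t.take 2 = ['"', '"'] := by
  cases t with
  | nil => simp [repTok_nil] at h
  | cons a r =>
    by_cases hp : List.isPrefixOf ['\'', '\'', '\''] (a :: r)
    · rw [repTok_cons_pos _ _ _ _ hp] at h
      simp at h
    · rw [repTok_cons_neg _ _ _ _ (by simp only [Bool.not_eq_true] at hp; exact hp)] at h
      cases r with
      | nil => simp [repTok_nil] at h
      | cons b r2 =>
        by_cases hp2 : List.isPrefixOf ['\'', '\'', '\''] (b :: r2)
        · rw [repTok_cons_pos _ _ _ _ hp2] at h
          simp at h
        · rw [repTok_cons_neg _ _ _ _ (by simp only [Bool.not_eq_true] at hp2; exact hp2)] at h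
          simp at h ⊢
          tauto

lemma prefix_iff_take3 (tok : List Char) (htok : tok.length = 3) (l : List Char) :
    tok.isPrefixOf l = true ↔ l.take 3 = tok := by
  rw [List.isPrefixOf_iff_prefix, List.prefix_iff_eq_take, htok]
  exact ⟨fun h => h.symm, fun h => h.symm⟩

lemma comp_eq (s : List Char) :
    repTok ['"', '"', '"'] ['\u00BB'] (repTok ['\'', '\'', '\''] ['\u00AA'] s) = scanLine s := by
  induction s using scanLine.induct with
  | case1 => simp [repTok_nil, scanLine]
  | case2 c t hq ih =>
    rw [scanLine, if_pos hq]
    rw [repTok_cons_pos _ _ _ _ ((prefix_iff_take3 _ rfl _).mpr hq)]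
    simp only [List.length_cons, List.singleton_append]
    rw [repTok_cons_neg _ _ _ _ (by simp [List.isPrefixOf])]
    simpa using ih
  | case3 c t hq hd ih =>
    rw [scanLine, if_neg hq, if_pos hd]
    obtain ⟨t', rfl, rfl⟩ : ∃ t', t = '"' :: '"' :: t' ∧ c = '"' := by
      cases t with
      | nil => simp at hd
      | cons b r =>
        cases r with
        | nil => simp at hd
        | cons b2 r2 =>
          simp at hd
          exact ⟨r2, by simp [hd.2.1, hd.2.2], hd.1⟩
    have hnq : ∀ (x : List Char), List.isPrefixOf ['\'', '\'', '\''] ('"' :: x) = false := by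
      intro x; simp [List.isPrefixOf]
    rw [repTok_cons_neg _ _ _ _ (hnq _), repTok_cons_neg _ _ _ _ (hnq _),
      repTok_cons_neg _ _ _ _ (hnq _)]
    rw [repTok_cons_pos _ _ _ _ (by simp [List.isPrefixOf])]
    simp only [List.length_cons, List.singleton_append, List.drop_succ_cons, List.drop_zero]
    simpa using ih
  | case4 c t hq hd ih =>
    rw [scanLine, if_neg hq, if_neg hd]
    rw [repTok_cons_neg _ _ _ _ (by
      by_contra hcon
      simp only [Bool.not_eq_false] at hcon
      have h3 := (prefix_iff_take3 _ rfl _).mp hcon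
      exact hq (by
        cases t with
        | nil => simp at h3
        | cons b r =>
          cases r with
          | nil => simp at h3
          | cons b2 r2 =>
            simp at h3 ⊢
            tauto))]
    by_cases hp : List.isPrefixOf ['"', '"', '"'] (c :: repTok ['\'', '\'', '\''] ['\u00AA'] t)
    · exfalso
      have h3 := (prefix_iff_take3 _ rfl _).mp hp
      have hc : c = '"' := by
        cases hx : repTok ['\'', '\'', '\''] ['\u00AA'] t with
        | nil => rw [hx] at h3; simp at h3
        | cons y ys => rw [hx] at h3; simp at h3; exact h3.1
      have h2 : (repTok ['\'', '\'', '\''] ['\u00AA'] t).take 2 = ['"', '"'] := by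
        cases hx : repTok ['\'', '\'', '\''] ['\u00AA'] t with
        | nil => rw [hx] at h3; simp at h3
        | cons y ys =>
          rw [hx] at h3
          cases ys with
          | nil => simp at h3
          | cons y2 ys2 => simp at h3 ⊢; tauto
      have ht2 := take2_rep t h2
      apply hd
      cases t with
      | nil => simp at ht2
      | cons b r =>
        cases r with
        | nil => simp at ht2
        | cons b2 r2 => simp at ht2 ⊢; tauto
    · rw [repTok_cons_neg _ _ _ _ (by simp only [Bool.not_eq_true] at hp; exact hp)]
      simp [ih]

lemma str_replace_q (s : String) :
    PySem.Str.replace s "'''" "\u00AA" =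
      String.ofList (repTok ['\'', '\'', '\''] ['\u00AA'] s.toList) := by
  rw [PySem.Str.replace]
  have h1 : ("'''" : String).toList = ['\'', '\'', '\''] := by decide
  have h2 : ("\u00AA" : String).toList = ['\u00AA'] := by decide
  rw [h1, h2, replace_eq_repTok _ _ _ (by decide)]

lemma str_replace_d (s : String) :
    PySem.Str.replace s "\"\"\"" "\u00BB" =
      String.ofList (repTok ['"', '"', '"'] ['\u00BB'] s.toList) := by
  rw [PySem.Str.replace]
  have h1 : ("\"\"\"" : String).toList = ['"', '"', '"'] := by decide
  have h2 : ("\u00BB" : String).toList = ['\u00BB'] := by decide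
  rw [h1, h2, replace_eq_repTok _ _ _ (by decide)]

lemma line_eq (line : String) :
    COMB_CHARS.items.foldl (fun rline p => PySem.Str.replace rline p.1 p.2) line =
      String.ofList (scanLine line.toList) := by
  have hitems : COMB_CHARS.items = [("'''", "\u00AA"), ("\"\"\"", "\u00BB")] := by decide
  rw [hitems]
  simp only [List.foldl_cons, List.foldl_nil]
  rw [str_replace_q, str_replace_d, String.toList_ofList]
  rw [comp_eq]

lemma foldl_append_map {α β : Type} (f : α → β) :
    ∀ (l : List α) (acc : List β), l.foldl (fun a x => a ++ [f x]) acc = acc ++ l.map f := by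
  intro l
  induction l with
  | nil => simp
  | cons x xs ih => intro acc; simp [ih]

-- ===== VERDICT (by name: the statement is the Claim_ definition above) =====
theorem remove_combined_chars_spec : Claim_equal_remove_combined_chars := by
  intro code _
  unfold Spec_remove_combined_chars remove_combined_chars remove_combined_chars_alt
  rw [foldl_append_map]
  simp only [List.nil_append]
  exact List.map_congr_left (fun line _ => line_eq line)
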